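-- pv_equiv track=rewrite | github.com/CommissarSilver/TraWiC | src/utils/nicad_checker.py | check_repo
-- ===== SOURCE A (Python) =====
-- def check_repo(repo_name: str, clone_classes: dict) -> bool:
--     """
--     Recieves the repository name alongside all the detected cloning results.
--     If even one file in the repo is detected to be clone of another file from another repo, the function returns True.
--
--     Args:
--         repo_name (str): name of the repository
--         clone_classes (dict): dictionary of clone classes and their files
--
--     Returns:
--         bool: whether the repo is a clone or not
--     """
--     # create a dictionary of the repo name and a list of booleans indicating whether the repo name is in the file name or not
--     repo_masks: dict[str, list[bool]] = {
--         key: [repo_name in string for string in string_list]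
--         for key, string_list in clone_classes.items()
--     }
--     # create a dictionary of the clone classes that contain the repo name
--     remain_repo: dict[str, list[bool]] = {
--         key: value for key, value in clone_classes.items() if True in repo_masks[key]
--     }
--     # count the number of times the repo name appears in the original and generated files
--     results_count: dict[str, dict[str, int]] = {
--         key: {
--             "original": sum("original" in string for string in string_list),
--             "generated": sum("generated" in string for string in string_list),
--         }
--         for key, string_list in remain_repo.items()
--     }
--     # return true if even one file is detected to be a clone of another file from another repo
--     results: bool = (
--         True
--         if any(
--             [
--                 value["original"] * value["generated"] > 0
--                 for value in results_count.values()
--             ]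
--         )
--         else False
--     )
--
--     return results
-- ===== SOURCE B (Python) =====
-- def check_repo(repo_name: str, clone_classes: dict) -> bool:
--     # Single early-exit pass: a clone class counts iff it mentions the repo
--     # and contains both an "original" and a "generated" file.
--     for string_list in clone_classes.values():
--         if (any(repo_name in s for s in string_list)
--                 and any("original" in s for s in string_list)
--                 and any("generated" in s for s in string_list)):
--             return True
--     return False
-- ===== Notes on version B (the rewrite author's own statement) =====
-- stated objective: simpler
-- what changed: Replaces the three chained dict comprehensions and intermediate mask/count tables with one early-exit loop over the clone classes testing three any() conditions per class.
import Mathlib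
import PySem

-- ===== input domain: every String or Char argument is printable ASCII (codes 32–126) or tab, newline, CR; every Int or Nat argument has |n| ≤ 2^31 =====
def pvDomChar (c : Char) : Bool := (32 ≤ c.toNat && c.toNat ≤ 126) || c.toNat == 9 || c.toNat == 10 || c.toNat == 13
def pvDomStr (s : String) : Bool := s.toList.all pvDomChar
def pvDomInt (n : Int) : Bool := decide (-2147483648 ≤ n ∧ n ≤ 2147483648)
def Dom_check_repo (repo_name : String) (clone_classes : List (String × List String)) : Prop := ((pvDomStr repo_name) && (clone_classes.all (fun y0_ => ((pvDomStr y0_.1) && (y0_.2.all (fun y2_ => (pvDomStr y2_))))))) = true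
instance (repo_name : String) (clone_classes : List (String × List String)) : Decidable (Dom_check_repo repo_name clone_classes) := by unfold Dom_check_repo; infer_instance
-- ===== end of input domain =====

-- B: one early-exit pass over the classes (three any-tests) instead of A's three chained dict comprehensions with intermediate mask/count tables. Objective: simpler.
-- ===== PORT A =====
-- dict comprehensions over clone_classes.items() build assoc lists keyed like the source dict;
-- repo_masks[key] is PySem.Dict first-match lookup (exact: a Python dict's keys are unique, see Pre_).
def check_repo (repo_name : String) (clone_classes : List (String × List String)) : Bool :=
  let repo_masks : PySem.Dict String (List Bool) :=
    ⟨clone_classes.map (fun kv => (kv.1, kv.2.map (fun s => PySem.Str.isIn repo_name s)))⟩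
  let remain_repo : List (String × List String) :=
    clone_classes.filter (fun kv => (PySem.Dict.getD repo_masks kv.1 []).contains true)
  let results_count : List (String × (Int × Int)) :=
    remain_repo.map (fun kv =>
      (kv.1,
        ((kv.2.map (fun s => if PySem.Str.isIn "original" s then (1 : Int) else 0)).sum,
         (kv.2.map (fun s => if PySem.Str.isIn "generated" s then (1 : Int) else 0)).sum)))
  if (results_count.map (fun kv => decide (kv.2.1 * kv.2.2 > 0))).any id = true then true else false

-- ===== PORT B =====
def check_repo_alt (repo_name : String) (clone_classes : List (String × List String)) : Bool :=
  match clone_classes with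
  | [] => false
  | (_, string_list) :: rest =>
    if string_list.any (fun s => PySem.Str.isIn repo_name s)
        && string_list.any (fun s => PySem.Str.isIn "original" s)
        && string_list.any (fun s => PySem.Str.isIn "generated" s)
      then true
      else check_repo_alt repo_name rest

-- ===== PRECONDITION & SPEC =====
-- Pre_ requires the class names (dict keys) to be pairwise distinct: clone_classes is a Python
-- dict, whose keys are always unique, so no input A accepts is excluded.
def Pre_check_repo (repo_name : String) (clone_classes : List (String × List String)) : Prop :=
  (clone_classes.map Prod.fst).Nodup
instance (repo_name : String) (clone_classes : List (String × List String)) : Decidable (Pre_check_repo repo_name clone_classes) := by unfold Pre_check_repo; infer_instance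
def pvWitness_check_repo : String × (List (String × List String)) :=
  ("repo", [("c1", ["repo_original.py", "repo_generated.py"]), ("c2", [])])
def Spec_check_repo (repo_name : String) (clone_classes : List (String × List String)) (out : Bool) : Prop := out = check_repo_alt repo_name clone_classes
instance (repo_name : String) (clone_classes : List (String × List String)) (out : Bool) : Decidable (Spec_check_repo repo_name clone_classes out) := by unfold Spec_check_repo; infer_instance

-- ===== CLAIM (what is proved, stated in full; the proofs are below) =====
def Claim_equal_check_repo : Prop := ∀ (repo_name : String) (clone_classes : List (String × List String)), Dom_check_repo repo_name clone_classes → Pre_check_repo repo_name clone_classes → Spec_check_repo repo_name clone_classes (check_repo repo_name clone_classes)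

-- ===== LEMMAS AND PROOFS =====

-- ===== VERDICT (by name: the statement is the Claim_ definition above) =====
-- first-match lookup in the mapped assoc list returns this pair's image when keys are unique
theorem getD_map_of_nodup {g : String × List String → List Bool}
    (cc : List (String × List String)) (h : (cc.map Prod.fst).Nodup)
    (kv : String × List String) (hm : kv ∈ cc) :
    PySem.Dict.getD ⟨cc.map (fun p => (p.1, g p))⟩ kv.1 [] = g kv := by
  induction cc with
  | nil => cases hm
  | cons hd tl ih =>
    simp only [List.map_cons, List.nodup_cons] at h
    rcases List.mem_cons.mp hm with rfl | hm'
    · simp [PySem.Dict.getD, PySem.Dict.get?]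
    · have hne : ¬ (hd.1 == kv.1) = true := by
        simp only [beq_iff_eq]
        intro he; exact h.1 (he ▸ (List.mem_map.mpr ⟨kv, hm', rfl⟩))
      simpa [PySem.Dict.getD, PySem.Dict.get?, hne] using ih h.2 hm'

theorem sum_indicator_pos (p : String → Bool) (l : List String) :
    decide (0 < (l.map (fun s => if p s then (1 : Int) else 0)).sum) = l.any p := by
  induction l with
  | nil => simp
  | cons hd tl ih =>
    have hnn : 0 ≤ (tl.map (fun s => if p s then (1 : Int) else 0)).sum := by
      apply List.sum_nonneg; intro x hx
      simp only [List.mem_map] at hx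
      obtain ⟨s, _, rfl⟩ := hx
      split <;> simp
    by_cases hp : p hd = true
    · simp only [List.map_cons, List.sum_cons, hp, if_true, List.any_cons, Bool.true_or]
      have : (0 : Int) < 1 + (tl.map (fun s => if p s then (1 : Int) else 0)).sum := by omega
      simp [this]
    · simp only [List.map_cons, List.sum_cons, hp, List.any_cons, Bool.false_or]
      simpa using ih

theorem alt_eq_any (repo_name : String) (cc : List (String × List String)) :
    check_repo_alt repo_name cc =
      cc.any (fun kv => kv.2.any (fun s => PySem.Str.isIn repo_name s)
        && kv.2.any (fun s => PySem.Str.isIn "original" s)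
        && kv.2.any (fun s => PySem.Str.isIn "generated" s)) := by
  induction cc with
  | nil => rfl
  | cons hd tl ih =>
    cases hd with
    | mk k v =>
      rw [List.any_cons]
      simp only [check_repo_alt]
      split_ifs with h
      · rw [h, Bool.true_or]
      · rw [Bool.not_eq_true] at h
        rw [h, Bool.false_or, ih]

theorem check_repo_spec : Claim_equal_check_repo := by
  intro repo_name cc _ hpre
  unfold Spec_check_repo
  unfold Pre_check_repo at hpre
  show check_repo repo_name cc = check_repo_alt repo_name cc
  rw [alt_eq_any]
  simp only [check_repo]
  rw [List.filter_congr (fun kv hm => by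
    rw [getD_map_of_nodup (g := fun p => p.2.map (fun s => PySem.Str.isIn repo_name s)) cc hpre kv hm])]
  rw [List.any_map, List.any_map, List.any_filter]
  simp only [Function.comp]
  have hmain : ∀ kv : String × List String,
      ((kv.2.map (fun s => PySem.Str.isIn repo_name s)).contains true
        && decide (0 < (kv.2.map (fun s => if PySem.Str.isIn "original" s then (1 : Int) else 0)).sum
            * (kv.2.map (fun s => if PySem.Str.isIn "generated" s then (1 : Int) else 0)).sum))
      = (kv.2.any (fun s => PySem.Str.isIn repo_name s)
        && kv.2.any (fun s => PySem.Str.isIn "original" s)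
        && kv.2.any (fun s => PySem.Str.isIn "generated" s)) := by
    intro kv
    have hcm : ∀ (l : List String) (f : String → Bool), (l.map f).contains true = l.any f := by
      intro l f
      induction l with
      | nil => rfl
      | cons x t ih => cases hfx : f x <;> simp [hfx, List.any_eq]
    have h1 : (kv.2.map (fun s => PySem.Str.isIn repo_name s)).contains true
        = kv.2.any (fun s => PySem.Str.isIn repo_name s) := hcm _ _
    have nn : ∀ p : String → Bool, 0 ≤ (kv.2.map (fun s => if p s then (1 : Int) else 0)).sum := by
      intro p
      apply List.sum_nonneg; intro x hx
      simp only [List.mem_map] at hx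
      obtain ⟨t, _, rfl⟩ := hx
      split <;> simp
    have h2 : decide (0 < (kv.2.map (fun s => if PySem.Str.isIn "original" s then (1 : Int) else 0)).sum
            * (kv.2.map (fun s => if PySem.Str.isIn "generated" s then (1 : Int) else 0)).sum)
        = (kv.2.any (fun s => PySem.Str.isIn "original" s)
            && kv.2.any (fun s => PySem.Str.isIn "generated" s)) := by
      have hna := nn (fun s => PySem.Str.isIn "original" s)
      have hnb := nn (fun s => PySem.Str.isIn "generated" s)
      have hab : (0 < (kv.2.map (fun s => if PySem.Str.isIn "original" s then (1 : Int) else 0)).sum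
            * (kv.2.map (fun s => if PySem.Str.isIn "generated" s then (1 : Int) else 0)).sum)
          ↔ (0 < (kv.2.map (fun s => if PySem.Str.isIn "original" s then (1 : Int) else 0)).sum
            ∧ 0 < (kv.2.map (fun s => if PySem.Str.isIn "generated" s then (1 : Int) else 0)).sum) :=
        ⟨fun h => ⟨by nlinarith, by nlinarith⟩, fun h => mul_pos h.1 h.2⟩
      rw [decide_eq_decide.mpr hab, Bool.decide_and,
        sum_indicator_pos (fun s => PySem.Str.isIn "original" s),
        sum_indicator_pos (fun s => PySem.Str.isIn "generated" s)]
    rw [h1, h2, Bool.and_assoc]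
  simp only [id_eq, gt_iff_lt]
  simp only [hmain]
  split_ifs with h
  · exact h.symm
  · rw [Bool.not_eq_true] at h
    exact h.symm
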